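-- pv_equiv track=rewrite | github.com/jenhuluck/Root-Lodging-Detection | driver.py | filterClusters
-- ===== SOURCE A (Python) =====
-- def filterClusters(img, thresh):
--
--     # Initialize cluster count
--     clusCount = 0
--     row = len(img)
--     col = len(img[0])
--
--     for i in range(row):
--
--         for j in range(col):
--
--             # Check for white pixel
--             if img[i][j] == 255:
--
--                 img[i][j] = 1
--
--                 # Initialize size of cluster as mutable object and set the minimum value to 1
--                 size = [1]
--                 size[0] = 1
--                 # size.append(1)
--
--                 # Perform DFS
--                 dfsWithSize(i, j, img, row, col, size)
--
--                 # Only cluster with pixel density above a certain threshold is kept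
--                 if size[0] > thresh:
--
--                     img[i][j] = 255
--
--                 # Update cluster count
--                 clusCount += 1
--
--     return img
--
-- def dfsWithSize(i, j, img, row, col, size):
--
--     if(i < 0 or i >= row or j < 0 or j >= col):
--
--         return
--
--     if(img[i][j] == 0):
--
--         return
--
--     if(img[i][j] == 255):
--
--         img[i][j] = 0
--         size[0] += 1
--
--     dfsWithSize(i + 1, j, img, row, col, size)
--     dfsWithSize(i, j + 1, img, row, col, size)
--     dfsWithSize(i - 1, j, img, row, col, size)
--     dfsWithSize(i, j - 1, img, row, col, size)
-- ===== SOURCE B (Python) =====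
-- # Flat single-index scan + iterative stack flood fill (no recursion, no nested scan,
-- # no cluster counter); same in-place mutation of img and same return value as A.
-- def filterClusters(img, thresh):
--     row = len(img)
--     col = len(img[0])
--     for k in range(row * col):
--         i, j = divmod(k, col)
--         if img[i][j] != 255:
--             continue
--         img[i][j] = 1
--         size = 1
--         todo = [(i, j)]
--         while todo:
--             a, b = todo.pop()
--             if 0 <= a < row and 0 <= b < col and img[a][b] != 0:
--                 if img[a][b] == 255:
--                     img[a][b] = 0
--                     size += 1
--                 todo.extend(((a, b - 1), (a - 1, b), (a, b + 1), (a + 1, b)))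
--         if size > thresh:
--             img[i][j] = 255
--     return img
-- ===== Notes on version B (the rewrite author's own statement) =====
-- stated objective: alternative
-- what changed: The nested row/column scan with a recursive DFS and a cluster counter is replaced by a single flat scan over cell indices (divmod decode) with an iterative explicit-stack flood fill under one combined validity guard and no counter.
import Mathlib
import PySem

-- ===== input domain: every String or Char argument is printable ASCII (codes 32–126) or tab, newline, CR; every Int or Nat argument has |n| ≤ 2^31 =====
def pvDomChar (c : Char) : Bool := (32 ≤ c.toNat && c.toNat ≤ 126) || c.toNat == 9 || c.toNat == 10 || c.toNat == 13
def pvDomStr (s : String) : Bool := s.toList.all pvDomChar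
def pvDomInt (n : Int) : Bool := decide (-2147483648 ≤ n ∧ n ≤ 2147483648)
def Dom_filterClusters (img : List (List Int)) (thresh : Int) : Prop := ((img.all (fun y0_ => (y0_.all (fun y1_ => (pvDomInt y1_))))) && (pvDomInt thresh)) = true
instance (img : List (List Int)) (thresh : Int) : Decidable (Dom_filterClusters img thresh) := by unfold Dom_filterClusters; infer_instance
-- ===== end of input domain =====

-- B replaces A's nested scan + recursive DFS by a flat single-index scan and an iterative
-- explicit-stack flood fill; both mutate img in place in Python — the equivalence proved is
-- about the returned value. The Lean ports carry a fuel counter only to make the loops total.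

-- ===== PORT A =====
-- cell read/write after the bounds guards (0 ≤ i < row, 0 ≤ j < col), so .toNat is exact
def getC (img : List (List Int)) (i j : Int) : Int := (img.getD i.toNat []).getD j.toNat 0
def setC (img : List (List Int)) (i j : Int) (v : Int) : List (List Int) :=
  img.set i.toNat ((img.getD i.toNat []).set j.toNat v)

-- literal port of dfsWithSize; the threaded fuel counter (one unit per call) only makes the
-- recursion total; the `min … f` caps are identities (dfsA_fuel_le below) needed for termination
def dfsA : Nat → Int → Int → Int → Int → List (List Int) → Int → List (List Int) × Int × Nat
  | 0, _, _, _, _, img, size => (img, size, 0)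
  | f+1, i, j, row, col, img, size =>
    if i < 0 ∨ i ≥ row ∨ j < 0 ∨ j ≥ col then (img, size, f)
    else if getC img i j = 0 then (img, size, f)
    else
      let s0 := if getC img i j = 255 then (setC img i j 0, size + 1) else (img, size)
      let r1 := dfsA f (i+1) j row col s0.1 s0.2
      let r2 := dfsA (min r1.2.2 f) i (j+1) row col r1.1 r1.2.1
      let r3 := dfsA (min r2.2.2 f) (i-1) j row col r2.1 r2.2.1
      dfsA (min r3.2.2 f) i (j-1) row col r3.1 r3.2.1
  termination_by f _ _ _ _ _ _ => f
  decreasing_by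
    · exact Nat.lt_succ_of_le (Nat.le_refl _)
    · exact Nat.lt_succ_of_le (Nat.min_le_right _ _)
    · exact Nat.lt_succ_of_le (Nat.min_le_right _ _)
    · exact Nat.lt_succ_of_le (Nat.min_le_right _ _)

def fuelFor (img : List (List Int)) : Nat := 8 * img.length * (img.headD []).length + 64

def filterClusters (img : List (List Int)) (thresh : Int) : List (List Int) :=
  let row : Int := img.length
  let col : Int := (img.headD []).length
  ((List.range img.length).foldl (fun (acc : List (List Int) × Int) (i : Nat) =>
    (List.range (img.headD []).length).foldl (fun (acc : List (List Int) × Int) (j : Nat) =>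
      if getC acc.1 i j = 255 then
        let im1 := setC acc.1 (i : Int) (j : Int) 1
        let r := dfsA (fuelFor img) i j row col im1 1
        (if r.2.1 > thresh then setC r.1 i j 255 else r.1, acc.2 + 1)
      else acc) acc) (img, 0)).1

-- ===== PORT B =====
-- literal port of Source B's while-stack loop (list head = stack top; combined validity guard;
-- state is the (image, size) pair); fuel only for totality
def loopB : Nat → List (Int × Int) → Int → Int → List (List Int) × Int → List (List Int) × Int
  | 0, _, _, _, st => st
  | _+1, [], _, _, st => st
  | f+1, (a,b)::rest, row, col, st =>
    if 0 ≤ a ∧ a < row ∧ 0 ≤ b ∧ b < col ∧ getC st.1 a b ≠ 0 then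
      loopB f ((a+1,b)::(a,b+1)::(a-1,b)::(a,b-1)::rest) row col
        (if getC st.1 a b = 255 then (setC st.1 a b 0, st.2 + 1) else st)
    else loopB f rest row col st

def filterClusters_alt (img : List (List Int)) (thresh : Int) : List (List Int) :=
  let row : Int := img.length
  let col : Int := (img.headD []).length
  (List.range (img.length * (img.headD []).length)).foldl (fun g k =>
    let i : Nat := k / (img.headD []).length
    let j : Nat := k % (img.headD []).length
    if getC g i j ≠ 255 then g
    else
      let r := loopB (fuelFor img) [((i : Int), (j : Int))] row col (setC g i j 1, 1)
      if r.2 > thresh then setC r.1 i j 255 else r.1) img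

-- ===== PRECONDITION & SPEC =====
-- Pre_ excludes inputs on which Python A raises: an empty image or a row shorter than the first
-- row (IndexError), and — when the image contains a 255 — any cell that is neither 0 nor 255
-- sitting next to a nonzero cell, on which A's pass-through recursion can recurse forever
-- (RecursionError). The last condition is local and slightly wider than the exact divergence
-- set, so it also excludes some inputs on which A returns (see the cite); A and B agree there too.
def NoTouch (img : List (List Int)) : Bool :=
  (List.range img.length).all (fun i => (List.range (img.headD []).length).all (fun j =>
    !((img.getD i []).getD j 0 != 0 && (img.getD i []).getD j 0 != 255) ||
      ((!(i+1 < img.length : Bool) || (img.getD (i+1) []).getD j 0 == 0) &&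
       (!(0 < i : Bool) || (img.getD (i-1) []).getD j 0 == 0) &&
       (!(j+1 < (img.headD []).length : Bool) || (img.getD i []).getD (j+1) 0 == 0) &&
       (!(0 < j : Bool) || (img.getD i []).getD (j-1) 0 == 0))))

def Pre_filterClusters (img : List (List Int)) (thresh : Int) : Prop :=
  img ≠ [] ∧ (∀ r ∈ img, (img.headD []).length ≤ r.length) ∧
  ((∀ r ∈ img, (255 : Int) ∉ r) ∨ NoTouch img = true)

instance (img : List (List Int)) (thresh : Int) : Decidable (Pre_filterClusters img thresh) := by
  unfold Pre_filterClusters; infer_instance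

def pvWitness_filterClusters : List (List Int) × Int := ([[255, 255, 0], [0, 255, 0], [0, 0, 255]], 1)

def Spec_filterClusters (img : List (List Int)) (thresh : Int) (out : List (List Int)) : Prop := out = filterClusters_alt img thresh
instance (img : List (List Int)) (thresh : Int) (out : List (List Int)) : Decidable (Spec_filterClusters img thresh out) := by unfold Spec_filterClusters; infer_instance

-- ===== CLAIM (what is proved, stated in full; the proofs are below) =====
def Claim_equal_filterClusters : Prop := ∀ (img : List (List Int)) (thresh : Int), Dom_filterClusters img thresh → Pre_filterClusters img thresh → Spec_filterClusters img thresh (filterClusters img thresh)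

-- ===== LEMMAS AND PROOFS =====

-- the fuel left over by dfsA never exceeds the fuel given, so every `min … f` cap is an identity
theorem dfsA_fuel_le (f : Nat) : ∀ i j row col img size, (dfsA f i j row col img size).2.2 ≤ f := by
  induction f using Nat.strong_induction_on with
  | _ f ih =>
    intro i j row col img size
    match f with
    | 0 => simp [dfsA]
    | f+1 =>
      rw [dfsA]
      split
      · exact Nat.le_succ f
      · split
        · exact Nat.le_succ f
        · exact le_trans (le_trans (ih _ (Nat.lt_succ_of_le (Nat.min_le_right _ _)) _ _ _ _ _ _)
            (Nat.min_le_right _ _)) (Nat.le_succ f)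

theorem loopB_nil (f : Nat) (row col : Int) (st : List (List Int) × Int) :
    loopB f [] row col st = st := by
  cases f <;> rfl

-- simulation: running B's stack machine from (i,j)::rest is running A's recursion at (i,j)
-- and continuing with the leftover fuel on rest
theorem loopB_sim (f : Nat) : ∀ i j row col (st : List (List Int) × Int) rest,
    loopB f ((i, j) :: rest) row col st =
      loopB (dfsA f i j row col st.1 st.2).2.2 rest row col
        ((dfsA f i j row col st.1 st.2).1, (dfsA f i j row col st.1 st.2).2.1) := by
  induction f using Nat.strong_induction_on with
  | _ f ih =>
    intro i j row col st rest
    obtain ⟨im, sz⟩ := st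
    match f with
    | 0 => simp [loopB, dfsA]
    | f+1 =>
      rw [loopB, dfsA]
      by_cases h1 : i < 0 ∨ i ≥ row ∨ j < 0 ∨ j ≥ col
      · rw [if_pos h1, if_neg (by rintro ⟨a1, a2, a3, a4, -⟩; rcases h1 with h | h | h | h <;> omega)]
      · rw [if_neg h1]
        by_cases h2 : getC im i j = 0
        · rw [if_pos h2, if_neg (by rintro ⟨-, -, -, -, a5⟩; exact a5 h2)]
        · rw [if_neg h2, if_pos ⟨by omega, by omega, by omega, by omega, h2⟩]
          simp only
          rw [ih f (Nat.lt_succ_self f)]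
          rw [Nat.min_eq_left (dfsA_fuel_le _ _ _ _ _ _ _)]
          rw [ih _ (Nat.lt_succ_of_le (dfsA_fuel_le _ _ _ _ _ _ _))]
          rw [Nat.min_eq_left (le_trans (dfsA_fuel_le _ _ _ _ _ _ _) (dfsA_fuel_le _ _ _ _ _ _ _))]
          rw [ih _ (Nat.lt_succ_of_le (le_trans (dfsA_fuel_le _ _ _ _ _ _ _) (dfsA_fuel_le _ _ _ _ _ _ _)))]
          rw [Nat.min_eq_left (le_trans (dfsA_fuel_le _ _ _ _ _ _ _)
            (le_trans (dfsA_fuel_le _ _ _ _ _ _ _) (dfsA_fuel_le _ _ _ _ _ _ _)))]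
          rw [ih _ (Nat.lt_succ_of_le (le_trans (dfsA_fuel_le _ _ _ _ _ _ _)
            (le_trans (dfsA_fuel_le _ _ _ _ _ _ _) (dfsA_fuel_le _ _ _ _ _ _ _))))]

theorem loopB_single (f : Nat) (i j row col : Int) (st : List (List Int) × Int) :
    loopB f [(i, j)] row col st =
      ((dfsA f i j row col st.1 st.2).1, (dfsA f i j row col st.1 st.2).2.1) := by
  rw [loopB_sim, loopB_nil]

-- a fold whose second (counter) component never feeds back into the first: the first
-- component is the fold of the first-component body alone
theorem foldl_fst {α β γ : Type} (l : List γ) (body : α × β → γ → α × β) (f : α → γ → α)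
    (h : ∀ p x, (body p x).1 = f p.1 x) : ∀ (init : α × β),
    (l.foldl body init).1 = l.foldl f init.1 := by
  induction l with
  | nil => intro init; rfl
  | cons x xs ih =>
    intro init
    rw [List.foldl_cons, List.foldl_cons, ih, h]

-- a flat fold over range (m*n) with divmod decoding is the nested fold over ranges m and n
theorem foldl_range_mul {α : Type} (m n : Nat) (f : α → Nat → Nat → α) : ∀ (init : α),
    (List.range (m * n)).foldl (fun a k => f a (k / n) (k % n)) init
      = (List.range m).foldl (fun a i => (List.range n).foldl (fun a j => f a i j) a) init := by
  induction m with
  | zero => intro init; simp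
  | succ m ih =>
    intro init
    rcases Nat.eq_zero_or_pos n with hn | hn
    · subst hn; simp
    · have hmul : (m + 1) * n = m * n + n := by ring
      rw [hmul, List.range_add, List.foldl_append, ih, List.range_succ, List.foldl_append,
        List.foldl_map, List.foldl_cons, List.foldl_nil]
      refine List.foldl_ext _ _ _ (fun a k hk => ?_)
      rw [List.mem_range] at hk
      have h1 : (m * n + k) / n = m := by
        rw [Nat.mul_comm, Nat.mul_add_div hn, Nat.div_eq_of_lt hk, Nat.add_zero]
      have h2 : (m * n + k) % n = k := by
        rw [Nat.mul_comm, Nat.mul_add_mod, Nat.mod_eq_of_lt hk]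
      rw [h1, h2]

theorem filterClusters_eq (img : List (List Int)) (thresh : Int) :
    filterClusters img thresh = filterClusters_alt img thresh := by
  unfold filterClusters filterClusters_alt
  simp only
  rw [foldl_range_mul img.length (img.headD []).length
    (fun g (i j : Nat) =>
      if getC g i j ≠ 255 then g
      else
        if (loopB (fuelFor img) [((i : Int), (j : Int))] (img.length) ((img.headD []).length)
              (setC g i j 1, 1)).2 > thresh then
          setC (loopB (fuelFor img) [((i : Int), (j : Int))] (img.length) ((img.headD []).length)
              (setC g i j 1, 1)).1 i j 255
        else (loopB (fuelFor img) [((i : Int), (j : Int))] (img.length) ((img.headD []).length)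
              (setC g i j 1, 1)).1) img]
  rw [foldl_fst (List.range img.length) _
    (fun (g : List (List Int)) (i : Nat) =>
      (List.range (img.headD []).length).foldl (fun g (j : Nat) =>
        if getC g i j = 255 then
          if (dfsA (fuelFor img) i j (img.length) ((img.headD []).length) (setC g i j 1) 1).2.1 > thresh then
            setC (dfsA (fuelFor img) i j (img.length) ((img.headD []).length) (setC g i j 1) 1).1 i j 255
          else (dfsA (fuelFor img) i j (img.length) ((img.headD []).length) (setC g i j 1) 1).1
        else g) g)
    (fun p i => foldl_fst (List.range (img.headD []).length) _ _
      (fun q j => by by_cases h : getC q.1 i j = 255 <;> simp [h]) p) (img, 0)]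
  refine List.foldl_ext _ _ _ (fun g i _ => ?_)
  refine List.foldl_ext _ _ _ (fun g j _ => ?_)
  by_cases h : getC g i j = 255
  · rw [if_pos h, if_neg (not_not_intro h)]
    simp only [loopB_single]
  · rw [if_neg h, if_pos h]

-- ===== VERDICT (by name: the statement is the Claim_ definition above) =====
theorem filterClusters_spec : Claim_equal_filterClusters := by
  intro img thresh _ _
  unfold Spec_filterClusters
  exact filterClusters_eq img thresh
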